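-- pv_equiv track=rewrite | github.com/rzhade3/Scripts | RedditAnalysis/base_converter.py | convert_from_base
-- ===== SOURCE A (Python) =====
-- def convert_from_base(n, base):
-- 	lower_n = n.upper()
-- 	num = 0
-- 	for c in lower_n:
-- 		num *= base
-- 		n_temp = ord(c)
-- 		if n_temp > 57:
-- 			n_temp -= 7
-- 		n_temp -= 48
-- 		num += n_temp
-- 	return num
-- ===== SOURCE B (Python) =====
-- def convert_from_base(n, base):
-- 	s = n.upper()
-- 	def dig(c):
-- 		t = ord(c)
-- 		if t > 57:
-- 			t -= 7
-- 		return t - 48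
-- 	def val(lo, hi):
-- 		if hi - lo <= 1:
-- 			return dig(s[lo]) if hi - lo == 1 else 0
-- 		mid = (lo + hi) // 2
-- 		return val(lo, mid) * base ** (hi - mid) + val(mid, hi)
-- 	return val(0, len(s))
-- ===== Notes on version B (the rewrite author's own statement) =====
-- stated objective: faster
-- what changed: Replaces the Horner running-multiply loop with a divide-and-conquer positional evaluation: split the string in half, convert each half recursively, combine as left*base**len(right)+right, which balances big-integer multiplications.
import Mathlib
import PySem

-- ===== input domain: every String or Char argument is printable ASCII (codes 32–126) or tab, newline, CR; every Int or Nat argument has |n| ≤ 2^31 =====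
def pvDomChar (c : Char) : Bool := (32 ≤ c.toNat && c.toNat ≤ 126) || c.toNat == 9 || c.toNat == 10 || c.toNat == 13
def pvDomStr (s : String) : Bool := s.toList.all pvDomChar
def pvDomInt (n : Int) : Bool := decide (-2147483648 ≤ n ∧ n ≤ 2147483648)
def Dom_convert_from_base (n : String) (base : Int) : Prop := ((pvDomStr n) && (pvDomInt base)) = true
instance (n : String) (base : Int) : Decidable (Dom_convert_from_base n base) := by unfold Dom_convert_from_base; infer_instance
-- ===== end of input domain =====

-- B replaces A's Horner running-multiply with a divide-and-conquer positional evaluation (faster on large inputs: balanced big-integer multiplications).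


-- ===== PORT A =====
-- Horner loop: num = num*base + digit(c) over the uppercased string.
def convert_from_base (n : String) (base : Int) : Int :=
  (PySem.Str.upper n).toList.foldl
    (fun num c =>
      let num := num * base
      let n_temp : Int := (c.toNat : Int)
      let n_temp := if n_temp > 57 then n_temp - 7 else n_temp
      let n_temp := n_temp - 48
      num + n_temp) 0

-- ===== PORT B =====
-- Source B's dig helper: the ord-based char-to-digit map.
def pvDig (c : Char) : Int :=
  let t : Int := (c.toNat : Int)
  let t := if t > 57 then t - 7 else t
  t - 48

-- Source B's val(lo, hi): value of the segment; ported on the list segment itself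
-- (Python's s[lo:mid]/s[mid:hi] split with mid = (lo+hi)//2 is take/drop at length/2).
def pvVal (base : Int) (l : List Char) : Int :=
  if h : l.length ≤ 1 then
    match l with
    | [] => 0
    | c :: _ => pvDig c
  else
    let mid := l.length / 2
    pvVal base (l.take mid) * base ^ (l.length - mid) + pvVal base (l.drop mid)
termination_by l.length
decreasing_by
  · simp only [List.length_take]; omega
  · simp only [List.length_drop]; omega

def convert_from_base_alt (n : String) (base : Int) : Int :=
  pvVal base (PySem.Str.upper n).toList

-- ===== PRECONDITION & SPEC =====
def Spec_convert_from_base (n : String) (base : Int) (out : Int) : Prop := out = convert_from_base_alt n base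
instance (n : String) (base : Int) (out : Int) : Decidable (Spec_convert_from_base n base out) := by unfold Spec_convert_from_base; infer_instance

-- ===== CLAIM (what is proved, stated in full; the proofs are below) =====
def Claim_equal_convert_from_base : Prop := ∀ (n : String) (base : Int), Dom_convert_from_base n base → Spec_convert_from_base n base (convert_from_base n base)

-- ===== LEMMAS AND PROOFS =====

-- positional value of a digit list: head digit weighted by base^(length of the tail)
def pvPoly (base : Int) : List Int → Int
  | [] => 0
  | d :: t => d * base ^ t.length + pvPoly base t

theorem pvHorner (base : Int) (f : Char → Int) :
    ∀ (l : List Char) (a : Int),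
      l.foldl (fun num c => num * base + f c) a
        = a * base ^ l.length + pvPoly base (l.map f) := by
  intro l
  induction l with
  | nil => intro a; simp [pvPoly]
  | cons c t ih =>
      intro a
      simp only [List.foldl_cons, List.map_cons, pvPoly, List.length_cons,
        List.length_map, ih]
      ring

theorem pvPoly_append (base : Int) (a b : List Int) :
    pvPoly base (a ++ b) = pvPoly base a * base ^ b.length + pvPoly base b := by
  induction a with
  | nil => simp [pvPoly]
  | cons d t ih =>
      simp only [List.cons_append, pvPoly, List.length_append, ih]
      rw [pow_add]
      ring

theorem pvVal_eq_poly (base : Int) : ∀ (m : Nat) (l : List Char), l.length ≤ m →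
    pvVal base l = pvPoly base (l.map pvDig) := by
  intro m
  induction m with
  | zero =>
      intro l hl
      have : l = [] := List.length_eq_zero_iff.mp (Nat.le_zero.mp hl)
      subst this
      simp [pvVal, pvPoly]
  | succ m ih =>
      intro l hl
      rw [pvVal]
      split
      · rename_i h1
        match l with
        | [] => simp [pvPoly]
        | [c] => simp [pvPoly]
        | c :: d :: t => simp at h1
      · rename_i h1
        have h2 : 2 ≤ l.length := by omega
        have htake := ih (l.take (l.length / 2)) (by simp; omega)
        have hdrop := ih (l.drop (l.length / 2)) (by simp; omega)
        simp only []
        rw [htake, hdrop]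
        have hsplit : l.map pvDig
            = (l.take (l.length / 2)).map pvDig ++ (l.drop (l.length / 2)).map pvDig := by
          rw [← List.map_append, List.take_append_drop]
        rw [hsplit, pvPoly_append]
        simp [List.length_drop]

-- ===== VERDICT (by name: the statement is the Claim_ definition above) =====
theorem convert_from_base_spec : Claim_equal_convert_from_base := by
  intro n base _
  show convert_from_base n base = convert_from_base_alt n base
  unfold convert_from_base convert_from_base_alt
  rw [pvHorner base (fun c =>
        (if ((c.toNat : Int)) > 57 then (c.toNat : Int) - 7 else (c.toNat : Int)) - 48),
      pvVal_eq_poly base (PySem.Str.upper n).toList.length _ le_rfl]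
  have : (fun c => (if ((c.toNat : Int)) > 57 then (c.toNat : Int) - 7 else (c.toNat : Int)) - 48)
      = pvDig := rfl
  rw [this]
  simp
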